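-- pv_equiv track=rewrite | github.com/m135531/CORD19SEARCHENGINE | source/search/ranking.py | intersection_multiplier
-- ===== SOURCE A (Python) =====
-- def intersection_multiplier(doc, intersections):
--     """
--     Compute multiplier for documents matching multiple query terms.
--
--     For multi-word queries, boosts documents that appear in deeper intersections
--     (i.e., match more query terms together).
--
--     Args:
--         doc: (doc_id, hit_list) tuple
--         intersections: List of cumulative intersection dicts
--
--     Returns:
--         Multiplier: 1 (no boost), (i+1)*2 (later intersection, relevant hits),
--         or (i+1)*100 (deepest intersection, special field match)
--     """
--     doc_id = doc[0]
--     multiplier = 1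
--
--     # Check from deepest intersection backwards (all terms -> fewer terms)
--     for i in range(len(intersections) - 1, 0, -1):
--         if doc_id in intersections[i]:
--             # Document is in this intersection
--             if intersections[i][doc_id]:
--                 # Intersection contains relevant (non-TEXT) hits
--                 # Deeper intersection = higher multiplier
--                 return (i + 1) * 100
--
--             # Intersection contains only TEXT hits
--             if multiplier == 1:
--                 multiplier = (i + 1) * 2
--
--     return multiplier
-- ===== SOURCE B (Python) =====
-- def intersection_multiplier(doc, intersections):
--     """Declarative restatement: collect the candidate index sets with
--     comprehensions and pick the deepest with max(), instead of scanning
--     imperatively with early return and a latch variable."""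
--     doc_id = doc[0]
--     truthy = [i for i, d in enumerate(intersections) if i and doc_id in d and d[doc_id]]
--     if truthy:
--         return (max(truthy) + 1) * 100
--     member = [i for i, d in enumerate(intersections) if i and doc_id in d]
--     if member:
--         return (max(member) + 1) * 2
--     return 1
-- ===== Notes on version B (the rewrite author's own statement) =====
-- stated objective: simpler
-- what changed: A's single imperative backward scan with an early return and a multiplier latch is replaced by a declarative formulation: two comprehensions collect the truthy and member index sets and max() picks the deepest, deciding once at the end.
import Mathlib
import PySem

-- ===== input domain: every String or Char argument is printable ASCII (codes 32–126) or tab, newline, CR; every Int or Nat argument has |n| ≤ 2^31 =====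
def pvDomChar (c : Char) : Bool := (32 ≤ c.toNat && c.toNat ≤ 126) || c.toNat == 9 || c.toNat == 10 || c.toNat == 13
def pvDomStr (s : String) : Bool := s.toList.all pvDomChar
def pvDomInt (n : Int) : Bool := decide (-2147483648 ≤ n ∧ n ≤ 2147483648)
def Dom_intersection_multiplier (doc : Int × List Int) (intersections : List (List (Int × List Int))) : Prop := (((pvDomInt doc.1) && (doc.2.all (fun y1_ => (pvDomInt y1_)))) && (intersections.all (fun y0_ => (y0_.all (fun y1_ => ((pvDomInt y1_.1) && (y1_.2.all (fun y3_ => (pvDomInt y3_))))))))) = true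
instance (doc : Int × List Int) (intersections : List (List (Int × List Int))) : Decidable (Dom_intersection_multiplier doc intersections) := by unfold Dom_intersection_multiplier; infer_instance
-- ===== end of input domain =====

-- B replaces A's backward early-return scan with a latch by a declarative form:
-- filter out the truthy / member index lists and take max() of each, deciding once at the end (simpler, same O(n)).


-- ===== PORT A =====
-- backward loop 'for i in range(len(intersections)-1, 0, -1)': process index k, then k-1, … down to 1
def pvLoopA (did : Int) (ints : List (List (Int × List Int))) : Nat → Int → Int
  | 0, m => m
  | k+1, m =>
    match (ints.getD (k+1) []).lookup did with   -- 'doc_id in intersections[i]' / 'intersections[i][doc_id]'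
    | some v =>
        if v ≠ [] then ((k : Int) + 2) * 100
        else pvLoopA did ints k (if m = 1 then ((k : Int) + 2) * 2 else m)
    | none => pvLoopA did ints k m

def intersection_multiplier (doc : Int × List Int) (intersections : List (List (Int × List Int))) : Int :=
  pvLoopA doc.1 intersections (intersections.length - 1) 1

-- ===== PORT B =====
-- 'i and doc_id in d and d[doc_id]'
def pvIsT (did : Int) (d : List (Int × List Int)) : Bool :=
  match d.lookup did with | some v => v ≠ [] | none => false
-- 'i and doc_id in d'
def pvIsM (did : Int) (d : List (Int × List Int)) : Bool := (d.lookup did).isSome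

def intersection_multiplier_alt (doc : Int × List Int) (intersections : List (List (Int × List Int))) : Int :=
  let did := doc.1
  let truthy := (PySem.List.enumerate intersections 0).filterMap
    (fun p => if p.1 != 0 && pvIsT did p.2 then some p.1 else none)
  match PySem.List.max? truthy (fun x => x) with
  | some m => (m + 1) * 100
  | none =>
    let member := (PySem.List.enumerate intersections 0).filterMap
      (fun p => if p.1 != 0 && pvIsM did p.2 then some p.1 else none)
    match PySem.List.max? member (fun x => x) with
    | some m => (m + 1) * 2
    | none => 1

-- ===== PRECONDITION & SPEC =====
def Spec_intersection_multiplier (doc : Int × List Int) (intersections : List (List (Int × List Int))) (out : Int) : Prop := out = intersection_multiplier_alt doc intersections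
instance (doc : Int × List Int) (intersections : List (List (Int × List Int))) (out : Int) : Decidable (Spec_intersection_multiplier doc intersections out) := by unfold Spec_intersection_multiplier; infer_instance

-- ===== CLAIM (what is proved, stated in full; the proofs are below) =====
def Claim_equal_intersection_multiplier : Prop := ∀ (doc : Int × List Int) (intersections : List (List (Int × List Int))), Dom_intersection_multiplier doc intersections → Spec_intersection_multiplier doc intersections (intersection_multiplier doc intersections)

-- ===== LEMMAS AND PROOFS =====

-- deepest-truthy / deepest-falsy index among intersections 1..k containing did
def pvScan (did : Int) (ints : List (List (Int × List Int))) : Nat → Option Int × Option Int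
  | 0 => (none, none)
  | k+1 =>
    match (ints.getD (k+1) []).lookup did with
    | none => pvScan did ints k
    | some v =>
        if v ≠ [] then (some ((k : Int) + 1), (pvScan did ints k).2)
        else ((pvScan did ints k).1, some ((k : Int) + 1))

theorem pvLoopA_eq_scan (did : Int) (ints : List (List (Int × List Int))) :
    ∀ (k : Nat) (m : Int), pvLoopA did ints k m =
      match pvScan did ints k with
      | (some i, _) => (i + 1) * 100
      | (none, f) =>
          if m = 1 then (match f with | some j => (j + 1) * 2 | none => 1) else m := by
  intro k
  induction k with
  | zero =>
    intro m
    simp only [pvLoopA, pvScan]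
    split_ifs with h <;> omega
  | succ k ih =>
    intro m
    simp only [pvLoopA, pvScan]
    cases h : (ints.getD (k+1) []).lookup did with
    | none => exact ih m
    | some v =>
      by_cases hv : v ≠ []
      · simp [hv]; ring
      · simp only [if_neg hv]
        rw [ih]
        rcases hs : pvScan did ints k with ⟨t, f⟩
        cases t with
        | some i => simp
        | none =>
          have h2 : ((k : Int) + 2) * 2 ≠ 1 := by omega
          by_cases hm : m = 1
          · simp [hm, h2]; ring_nf
          · simp [hm]

theorem pvScan_append (did : Int) (xs ys : List (List (Int × List Int))) :
    ∀ (k : Nat), k < xs.length → pvScan did (xs ++ ys) k = pvScan did xs k := by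
  intro k
  induction k with
  | zero => intro _; simp [pvScan]
  | succ k ih =>
    intro hk
    have hk' : k < xs.length := Nat.lt_of_succ_lt hk
    have hget : (xs ++ ys).getD (k+1) [] = xs.getD (k+1) [] := by
      simp [List.getD, List.getElem?_append_left hk]
    simp only [pvScan, hget, ih hk']

-- values produced by pvScan are bounded by the scan depth
theorem pvScan_bound (did : Int) (ints : List (List (Int × List Int))) :
    ∀ (k : Nat),
      (∀ i, (pvScan did ints k).1 = some i → i ≤ (k : Int)) ∧
      (∀ j, (pvScan did ints k).2 = some j → j ≤ (k : Int)) := by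
  intro k
  induction k with
  | zero => constructor <;> intro i h <;> simp [pvScan] at h
  | succ k ih =>
    simp only [pvScan]
    cases h : (ints.getD (k+1) []).lookup did with
    | none =>
      constructor
      · intro i hi; have := ih.1 i hi; omega
      · intro j hj; have := ih.2 j hj; omega
    | some v =>
      by_cases hv : v ≠ []
      · simp only [if_pos hv]
        constructor
        · intro i hi; simp at hi; omega
        · intro j hj; have := ih.2 j hj; omega
      · simp only [if_neg hv]
        constructor
        · intro i hi; have := ih.1 i hi; omega
        · intro j hj; simp at hj; omega

-- Python max() on a nonempty list as a running fold
def pvMaxList : List Int → Option Int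
  | [] => none
  | x :: t => some (t.foldl max x)

theorem max?_eq_pvMaxList (l : List Int) :
    PySem.List.max? l (fun x => x) = pvMaxList l := by
  cases l with
  | nil => simp [PySem.List.max?_eq_none_iff, pvMaxList]
  | cons x t => simp [PySem.List.max?_id_cons, pvMaxList]

def pvOptMax : Option Int → Option Int → Option Int
  | none, b => b
  | some a, none => some a
  | some a, some b => some (max a b)

def pvTList (did : Int) (ints : List (List (Int × List Int))) : List Int :=
  (PySem.List.enumerate ints 0).filterMap
    (fun p => if p.1 != 0 && pvIsT did p.2 then some p.1 else none)

def pvMList (did : Int) (ints : List (List (Int × List Int))) : List Int :=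
  (PySem.List.enumerate ints 0).filterMap
    (fun p => if p.1 != 0 && pvIsM did p.2 then some p.1 else none)

theorem pvFoldlMax_le (a : Int) : ∀ (l : List Int) (x : Int), x ≤ a → (∀ y ∈ l, y ≤ a) → l.foldl max x ≤ a := by
  intro l
  induction l with
  | nil => intro x hx _; simpa using hx
  | cons z zs ih =>
    intro x hx hl
    simp only [List.foldl_cons]
    exact ih _ (max_le hx (hl z (by simp))) (fun y hy => hl y (by simp [hy]))

theorem pvMaxList_append_big (l : List Int) (a : Int) (h : ∀ y ∈ l, y ≤ a) :
    pvMaxList (l ++ [a]) = some a := by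
  cases l with
  | nil => simp [pvMaxList]
  | cons x t =>
    simp only [pvMaxList, List.cons_append, List.foldl_append, List.foldl_cons, List.foldl_nil,
      Option.some.injEq]
    exact max_eq_right (pvFoldlMax_le a t x (h x (by simp)) (fun y hy => h y (by simp [hy])))

theorem pvT_mem_lt (did : Int) (xs : List (List (Int × List Int))) :
    ∀ y ∈ pvTList did xs, y < (xs.length : Int) := by
  intro y hy
  simp only [pvTList, List.mem_filterMap] at hy
  obtain ⟨p, hp, hcond⟩ := hy
  rcases (PySem.List.mem_enumerate_iff _ _ _).mp hp with ⟨k, hk, rfl⟩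
  split at hcond
  · cases hcond
    omega
  · cases hcond

theorem pvM_mem_lt (did : Int) (xs : List (List (Int × List Int))) :
    ∀ y ∈ pvMList did xs, y < (xs.length : Int) := by
  intro y hy
  simp only [pvMList, List.mem_filterMap] at hy
  obtain ⟨p, hp, hcond⟩ := hy
  rcases (PySem.List.mem_enumerate_iff _ _ _).mp hp with ⟨k, hk, rfl⟩
  split at hcond
  · cases hcond
    omega
  · cases hcond

theorem pvOptMax_absorb_left (f : Option Int) (a : Int) (h : ∀ b, f = some b → b ≤ a) :
    pvOptMax (some a) f = some a := by
  cases f with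
  | none => rfl
  | some b => simp [pvOptMax, max_eq_left (h b rfl)]

theorem pvOptMax_absorb_right (t : Option Int) (b : Int) (h : ∀ a, t = some a → a ≤ b) :
    pvOptMax t (some b) = some b := by
  cases t with
  | none => rfl
  | some a => simp [pvOptMax, max_eq_right (h a rfl)]

-- the two filtered lists' maxima equal the backward-scan components
theorem pvMax_eq_scan (did : Int) (ints : List (List (Int × List Int))) :
    pvMaxList (pvTList did ints) = (pvScan did ints (ints.length - 1)).1 ∧
    pvMaxList (pvMList did ints) =
      pvOptMax (pvScan did ints (ints.length - 1)).1 (pvScan did ints (ints.length - 1)).2 := by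
  induction ints using List.reverseRecOn with
  | nil => simp [pvTList, pvMList, PySem.List.enumerate, pvMaxList, pvScan, pvOptMax]
  | append_singleton xs x ih =>
    have henum : PySem.List.enumerate (xs ++ [x]) 0
        = PySem.List.enumerate xs 0 ++ [((0 : Int) + xs.length, x)] := by
      rw [PySem.List.enumerate_append]; simp [PySem.List.enumerate]
    by_cases hxsnil : xs = []
    · subst hxsnil
      simp [pvTList, pvMList, PySem.List.enumerate, pvMaxList, pvScan, pvOptMax]
    · have hlen1 : 1 ≤ xs.length := by
        cases xs with
        | nil => exact absurd rfl hxsnil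
        | cons y ys => simp
      have hne : ((0 : Int) + (xs.length : Int)) ≠ 0 := by omega
      have hT : pvTList did (xs ++ [x]) =
          pvTList did xs ++ (if pvIsT did x then [((0:Int) + xs.length)] else []) := by
        simp only [pvTList, henum, List.filterMap_append, List.filterMap_cons, List.filterMap_nil]
        cases hpt : pvIsT did x <;> simp [hxsnil]
      have hM : pvMList did (xs ++ [x]) =
          pvMList did xs ++ (if pvIsM did x then [((0:Int) + xs.length)] else []) := by
        simp only [pvMList, henum, List.filterMap_append, List.filterMap_cons, List.filterMap_nil]
        cases hpm : pvIsM did x <;> simp [hxsnil]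
      have hlen' : (xs ++ [x]).length - 1 = (xs.length - 1) + 1 := by simp; omega
      have hidx : (xs.length - 1) + 1 = xs.length := by omega
      have hgetlast : (xs ++ [x]).getD xs.length [] = x := by simp [List.getD]
      have hprev : pvScan did (xs ++ [x]) (xs.length - 1) = pvScan did xs (xs.length - 1) :=
        pvScan_append did xs [x] (xs.length - 1) (by omega)
      have hcast : ((xs.length - 1 : Nat) : Int) + 1 = (0 : Int) + (xs.length : Int) := by
        push_cast [Nat.cast_sub hlen1]; ring
      rcases hs : pvScan did xs (xs.length - 1) with ⟨t, f⟩
      have hbt := (pvScan_bound did xs (xs.length - 1)).1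
      have hbf := (pvScan_bound did xs (xs.length - 1)).2
      rw [hs] at hbt hbf ih
      have hlt : ∀ i : Int, i ≤ ((xs.length - 1 : Nat) : Int) → i < (0 : Int) + xs.length := by
        intro i hi
        have h9 : ((xs.length - 1 : Nat) : Int) = (xs.length : Int) - 1 := by
          push_cast [Nat.cast_sub hlen1]; ring
        omega
      rw [hlen']
      simp only [pvScan]
      rw [hidx, hgetlast, hprev, hs, hcast]
      have hTb : ∀ y ∈ pvTList did xs, y ≤ (0:Int) + ↑xs.length := by
        intro y hy; have := pvT_mem_lt did xs y hy; omega
      have hMb : ∀ y ∈ pvMList did xs, y ≤ (0:Int) + ↑xs.length := by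
        intro y hy; have := pvM_mem_lt did xs y hy; omega
      have hfb : ∀ b, f = some b → b ≤ (0:Int) + ↑xs.length := by
        intro b hb; have := hbf b hb; omega
      have htb : ∀ a, t = some a → a ≤ (0:Int) + ↑xs.length := by
        intro a h; have := hbt a h; omega
      cases hlk : x.lookup did with
      | none =>
        have hptF : pvIsT did x = false := by simp [pvIsT, hlk]
        have hpmF : pvIsM did x = false := by simp [pvIsM, hlk]
        simpa [hT, hM, hptF, hpmF] using ih
      | some v =>
        dsimp only
        by_cases hv : v ≠ []
        · have hptT : pvIsT did x = true := by simp [pvIsT, hlk, hv]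
          have hpmT : pvIsM did x = true := by simp [pvIsM, hlk]
          rw [if_pos hv]
          refine ⟨?_, ?_⟩
          · rw [hT, if_pos hptT, pvMaxList_append_big _ _ hTb]
          · rw [hM, if_pos hpmT, pvMaxList_append_big _ _ hMb,
              pvOptMax_absorb_left f _ hfb]
        · have hvnil : v = [] := by simpa using hv
          have hptF : ¬ (pvIsT did x = true) := by simp [pvIsT, hlk, hvnil]
          have hpmT : pvIsM did x = true := by simp [pvIsM, hlk]
          rw [if_neg hv]
          refine ⟨?_, ?_⟩
          · rw [hT, if_neg hptF, List.append_nil, ih.1]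
          · rw [hM, if_pos hpmT, pvMaxList_append_big _ _ hMb]
            exact (pvOptMax_absorb_right t _ htb).symm

-- ===== VERDICT (by name: the statement is the Claim_ definition above) =====
theorem intersection_multiplier_spec : Claim_equal_intersection_multiplier := by
  intro doc ints _
  unfold Spec_intersection_multiplier intersection_multiplier intersection_multiplier_alt
  dsimp only
  rw [pvLoopA_eq_scan,
      max?_eq_pvMaxList, max?_eq_pvMaxList,
      show ((PySem.List.enumerate ints 0).filterMap
        (fun p => if p.1 != 0 && pvIsT doc.1 p.2 then some p.1 else none)) = pvTList doc.1 ints from rfl,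
      show ((PySem.List.enumerate ints 0).filterMap
        (fun p => if p.1 != 0 && pvIsM doc.1 p.2 then some p.1 else none)) = pvMList doc.1 ints from rfl,
      (pvMax_eq_scan doc.1 ints).1, (pvMax_eq_scan doc.1 ints).2]
  rcases pvScan doc.1 ints (ints.length - 1) with ⟨t, f⟩
  cases t <;> cases f <;> simp [pvOptMax]
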